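-- pv_equiv track=rewrite | github.com/slens2/BabyShark | tight_gate.py | _heavy_hits
-- ===== SOURCE A (Python) =====
-- from typing import Dict, Tuple
--
-- def _normalize_key(name: str) -> str:
--     return name.strip().replace(" ", "").replace("-", "").replace("_", "").upper()
--
-- def _heavy_hits(h1_map: Dict[str,str], ema200_series, side: str) -> int:
--     """
--     Đếm số lượng các chỉ báo EMA200, Supertrend, Range trên H1 đồng pha với side,
--     so sánh key đã được normalize để tránh lỗi không khớp tên.
--     """
--     if side == "NEUTRAL": return 0
--     want = "LONG" if side == "LONG" else "SHORT"
--     keys = [_normalize_key(k) for k in ("EMA200", "Supertrend", "Range")]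
--     hits = 0
--     # Normalize key khi so sánh
--     for want_key in keys:
--         for k, v in h1_map.items():
--             if _normalize_key(k) == want_key and v == want:
--                 hits += 1
--                 break  # Một key chỉ tính một lần
--     return hits
-- ===== SOURCE B (Python) =====
-- def _normalize_key(name: str) -> str:
--     return name.strip().replace(" ", "").replace("-", "").replace("_", "").upper()
--
-- def _heavy_hits(h1_map, ema200_series, side: str) -> int:
--     if side == "NEUTRAL":
--         return 0
--     want = "LONG" if side == "LONG" else "SHORT"
--     present = {_normalize_key(k) for k, v in h1_map.items() if v == want}
--     wanted = {_normalize_key(x) for x in ("EMA200", "Supertrend", "Range")}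
--     return len(present & wanted)
-- ===== Notes on version B (the rewrite author's own statement) =====
-- stated objective: simpler
-- what changed: Replaces the nested loop (three rescans of the map with a break) by one pass that builds a set of normalized keys holding the wanted side, returning the size of its intersection with the three wanted names.
import Mathlib
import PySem

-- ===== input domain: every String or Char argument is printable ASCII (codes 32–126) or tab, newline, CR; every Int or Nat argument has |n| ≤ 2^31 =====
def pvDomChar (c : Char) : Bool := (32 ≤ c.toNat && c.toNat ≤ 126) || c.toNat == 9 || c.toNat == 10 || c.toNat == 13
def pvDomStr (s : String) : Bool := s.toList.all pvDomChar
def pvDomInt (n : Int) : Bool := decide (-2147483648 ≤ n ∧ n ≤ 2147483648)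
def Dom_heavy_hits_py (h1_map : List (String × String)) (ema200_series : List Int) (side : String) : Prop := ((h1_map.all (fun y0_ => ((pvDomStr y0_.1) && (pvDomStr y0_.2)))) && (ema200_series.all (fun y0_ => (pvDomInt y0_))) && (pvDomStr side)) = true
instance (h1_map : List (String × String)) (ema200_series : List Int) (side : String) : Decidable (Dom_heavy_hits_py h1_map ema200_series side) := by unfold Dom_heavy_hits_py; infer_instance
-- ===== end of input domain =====

-- B builds the set of normalized keys with the wanted side in one pass and intersects it
-- with the three wanted names, instead of rescanning the map once per wanted name (simpler).


-- ===== PORT A =====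
-- _normalize_key
def pvNormKey (name : String) : String :=
  PySem.Str.upper (PySem.Str.replace (PySem.Str.replace (PySem.Str.replace (PySem.Str.strip name) " " "") "-" "") "_" "")

-- inner 'for k, v in h1_map.items(): … break' loop of A
def pvInnerA (h1_map : List (String × String)) (want_key want : String) : Bool :=
  match h1_map with
  | [] => false
  | (k, v) :: rest =>
    if pvNormKey k = want_key ∧ v = want then true else pvInnerA rest want_key want

def heavy_hits_py (h1_map : List (String × String)) (ema200_series : List Int) (side : String) : Int :=
  if side = "NEUTRAL" then 0
  else
    let want := if side = "LONG" then "LONG" else "SHORT"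
    let keys := [pvNormKey "EMA200", pvNormKey "Supertrend", pvNormKey "Range"]
    keys.foldl (fun hits want_key => if pvInnerA h1_map want_key want then hits + 1 else hits) 0

-- ===== PORT B =====
def heavy_hits_py_alt (h1_map : List (String × String)) (ema200_series : List Int) (side : String) : Int :=
  if side = "NEUTRAL" then 0
  else
    let want := if side = "LONG" then "LONG" else "SHORT"
    let present := PySem.Set.ofList ((h1_map.filter (fun p => p.2 == want)).map (fun p => pvNormKey p.1))
    let wanted := PySem.Set.ofList (["EMA200", "Supertrend", "Range"].map pvNormKey)
    (PySem.Set.len (PySem.Set.inter present wanted) : Int)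

-- ===== PRECONDITION & SPEC =====
def Spec_heavy_hits_py (h1_map : List (String × String)) (ema200_series : List Int) (side : String) (out : Int) : Prop := out = heavy_hits_py_alt h1_map ema200_series side
instance (h1_map : List (String × String)) (ema200_series : List Int) (side : String) (out : Int) : Decidable (Spec_heavy_hits_py h1_map ema200_series side out) := by unfold Spec_heavy_hits_py; infer_instance

-- ===== CLAIM (what is proved, stated in full; the proofs are below) =====
def Claim_equal_heavy_hits_py : Prop := ∀ (h1_map : List (String × String)) (ema200_series : List Int) (side : String), Dom_heavy_hits_py h1_map ema200_series side → Spec_heavy_hits_py h1_map ema200_series side (heavy_hits_py h1_map ema200_series side)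

-- ===== LEMMAS AND PROOFS =====

-- A's inner break loop decides membership of want_key in B's 'present' list
theorem pvInnerA_eq_contains (h1_map : List (String × String)) (want_key want : String) :
    pvInnerA h1_map want_key want =
      ((h1_map.filter (fun p => p.2 == want)).map (fun p => pvNormKey p.1)).contains want_key := by
  induction h1_map with
  | nil => rfl
  | cons p rest ih =>
    obtain ⟨k, v⟩ := p
    simp only [pvInnerA]
    by_cases h : pvNormKey k = want_key ∧ v = want
    · simp [h.1, h.2]
    · rw [if_neg h, ih]
      by_cases hv : v = want
      · have hk : ¬ want_key = pvNormKey k := fun e => h ⟨e.symm, hv⟩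
        simp [hv, beq_iff_eq, hk]
      · simp [hv]

-- two nodup lists have filters of equal length against each other (same finite set counted)
theorem length_filter_comm (s t : List String) (hs : s.Nodup) (ht : t.Nodup) :
    (s.filter (fun x => t.contains x)).length = (t.filter (fun x => s.contains x)).length := by
  apply List.Perm.length_eq
  rw [List.perm_ext_iff_of_nodup (hs.filter _) (ht.filter _)]
  intro a
  simp [List.mem_filter, List.contains_eq_mem, and_comm]

-- ===== VERDICT (by name: the statement is the Claim_ definition above) =====
theorem heavy_hits_py_spec : Claim_equal_heavy_hits_py := by
  intro h1_map ema200_series side _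
  show heavy_hits_py h1_map ema200_series side = heavy_hits_py_alt h1_map ema200_series side
  unfold heavy_hits_py heavy_hits_py_alt
  by_cases hn : side = "NEUTRAL"
  · simp [hn]
  · simp only [hn, if_false]
    set want := if side = "LONG" then "LONG" else "SHORT" with hw
    set L := (h1_map.filter (fun p => p.2 == want)).map (fun p => pvNormKey p.1) with hL
    have hword : PySem.Set.ofList (["EMA200", "Supertrend", "Range"].map pvNormKey)
        = ["EMA200", "SUPERTREND", "RANGE"] := by decide
    have hinter : PySem.Set.inter (PySem.Set.ofList L) (["EMA200", "SUPERTREND", "RANGE"])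
        = (PySem.Set.ofList L).filter (fun x => (["EMA200", "SUPERTREND", "RANGE"] : List String).contains x) := rfl
    rw [hword, hinter]
    have hswap := length_filter_comm (PySem.Set.ofList L) ["EMA200", "SUPERTREND", "RANGE"]
      (PySem.Set.nodup_ofList L) (by decide)
    have hcontains : ∀ x : String, (PySem.Set.ofList L).contains x = L.contains x := by
      intro x
      simp [List.contains_eq_mem, PySem.Set.mem_ofList]
    unfold PySem.Set.len
    rw [hswap]
    have e1 : pvNormKey "EMA200" = "EMA200" := by decide
    have e2 : pvNormKey "Supertrend" = "SUPERTREND" := by decide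
    have e3 : pvNormKey "Range" = "RANGE" := by decide
    have h1 := pvInnerA_eq_contains h1_map (pvNormKey "EMA200") want
    have h2 := pvInnerA_eq_contains h1_map (pvNormKey "Supertrend") want
    have h3 := pvInnerA_eq_contains h1_map (pvNormKey "Range") want
    rw [e1, ← hL] at h1
    rw [e2, ← hL] at h2
    rw [e3, ← hL] at h3
    have hfun : (fun x => List.contains (PySem.Set.ofList L) x) = (fun x : String => L.contains x) :=
      funext hcontains
    rw [hfun]
    simp only [List.foldl, e1, e2, e3, h1, h2, h3]
    cases hb1 : L.contains "EMA200" <;> cases hb2 : L.contains "SUPERTREND" <;>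
      cases hb3 : L.contains "RANGE" <;> simp [List.filter, ← List.contains_eq_mem, hb1, hb2, hb3]
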